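-- pv_equiv track=rewrite | github.com/nbehrnd/RegioSQM | regiosqm/molecule_svg.py | svg_corrector
-- ===== SOURCE A (Python) =====
-- def svg_corrector(recorder):
--     """adjust the consecution of entries in the .svg
--
--     The altered functions create_svg and merge_svg of this file yield
--     a .svg where ellipses partially hide the structure formula plot.
--     A move of the ellipses' definition within the .svg string ahead of
--     those about the strokes of the formula corrects this, i.e., moves
--     them into the background of the formula."""
--     register_raw = []
--     register_ellipses = []
--     output_string = ""
--
--     register_raw = recorder.split("\n")
--
--     # identify entries to highlight positions
--     for entry in register_raw:
--         if str("ellipse") in str(entry):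
--             retain = str(entry).strip()
--             register_ellipses.append(retain)
--     register_ellipses = "\n".join(register_ellipses)
--     register_ellipses += str("\n")
--
--     # rebuild the .svg with an adjusted consecution of entries
--     for entry in register_raw:
--         if str("bond") in str(entry):
--             output_string += str(register_ellipses)
--             register_ellipses = ""
--             output_string += str("{}\n".format(entry))
--
--         elif (str("ellipse") or str("</svg>")) in str(entry):
--             pass
--         else:
--             output_string += str("{}\n".format(entry))
--     output_string += str("</svg>")
--     return output_string
-- ===== SOURCE B (Python) =====
-- def svg_corrector(recorder):
--     lines = recorder.split("\n")
--     block = "\n".join(l.strip() for l in lines if "ellipse" in l) + "\n"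
--     kept = [l for l in lines if "bond" in l or "ellipse" not in l]
--     idx = next((i for i, l in enumerate(kept) if "bond" in l), None)
--     if idx is None:
--         body = "".join(l + "\n" for l in kept)
--     else:
--         body = "".join(l + "\n" for l in kept[:idx]) + block + "".join(l + "\n" for l in kept[idx:])
--     return body + "</svg>"
-- ===== Notes on version B (the rewrite author's own statement) =====
-- stated objective: simpler
-- what changed: A's stateful rebuild loop (carrying the ellipse block in a mutable variable that is flushed and emptied at the first bond line) is replaced by a declarative filter + first-bond-index + one splice of the block into the kept lines.
import Mathlib
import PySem

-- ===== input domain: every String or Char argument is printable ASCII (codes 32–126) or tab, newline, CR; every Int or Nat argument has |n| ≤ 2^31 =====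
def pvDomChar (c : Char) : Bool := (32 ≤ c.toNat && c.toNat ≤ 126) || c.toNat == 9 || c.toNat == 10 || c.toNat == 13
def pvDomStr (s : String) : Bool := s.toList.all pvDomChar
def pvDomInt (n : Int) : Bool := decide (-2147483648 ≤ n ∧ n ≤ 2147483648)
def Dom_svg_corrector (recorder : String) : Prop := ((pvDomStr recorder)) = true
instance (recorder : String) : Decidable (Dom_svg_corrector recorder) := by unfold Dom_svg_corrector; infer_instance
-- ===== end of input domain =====

-- B replaces A's stateful flag loop (ellipse block consumed at the first bond line) by a
-- filter + first-bond-index + splice assembly; objective: simpler, same cost.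

-- ===== PORT A =====
-- A, transliterated over List Char (PySem.Chars primitives; String.ofList only at the very end).
-- The second loop's `elif (str("ellipse") or str("</svg>")) in str(entry)` tests only
-- "ellipse" in entry (Python `or` on truthy literals), ported as such.
def svg_corrector (recorder : String) : String :=
  let register_raw : List (List Char) := PySem.Chars.splitOn recorder.toList "\n".toList
  -- first loop: collect stripped ellipse lines
  let register_ellipses₀ : List (List Char) :=
    register_raw.foldl
      (fun acc entry =>
        if PySem.Chars.isIn "ellipse".toList entry then acc ++ [PySem.Chars.strip entry] else acc)
      []
  let register_ellipses : List Char :=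
    PySem.Chars.join "\n".toList register_ellipses₀ ++ "\n".toList
  -- second loop: state = (output_string, register_ellipses)
  let res : List Char × List Char :=
    register_raw.foldl
      (fun st entry =>
        if PySem.Chars.isIn "bond".toList entry then
          (st.1 ++ st.2 ++ entry ++ "\n".toList, ([] : List Char))
        else if PySem.Chars.isIn "ellipse".toList entry then
          st
        else
          (st.1 ++ entry ++ "\n".toList, st.2))
      (([] : List Char), register_ellipses)
  String.ofList (res.1 ++ "</svg>".toList)

-- ===== PORT B =====
-- B, transliterated: block of stripped ellipse lines, kept lines, first bond index, splice.
def svg_corrector_alt (recorder : String) : String :=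
  let lines : List (List Char) := PySem.Chars.splitOn recorder.toList "\n".toList
  let block : List Char :=
    PySem.Chars.join "\n".toList
      ((lines.filter (fun l => PySem.Chars.isIn "ellipse".toList l)).map PySem.Chars.strip)
      ++ "\n".toList
  let kept : List (List Char) :=
    lines.filter (fun l => PySem.Chars.isIn "bond".toList l || !PySem.Chars.isIn "ellipse".toList l)
  let body : List Char :=
    match kept.findIdx? (fun l => PySem.Chars.isIn "bond".toList l) with
    | none => ((kept.map (· ++ "\n".toList)).flatten)
    | some i =>
        ((kept.take i).map (· ++ "\n".toList)).flatten ++ block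
          ++ ((kept.drop i).map (· ++ "\n".toList)).flatten
  String.ofList (body ++ "</svg>".toList)

-- ===== PRECONDITION & SPEC =====
def Spec_svg_corrector (recorder : String) (out : String) : Prop := out = svg_corrector_alt recorder
instance (recorder : String) (out : String) : Decidable (Spec_svg_corrector recorder out) := by unfold Spec_svg_corrector; infer_instance

-- ===== CLAIM (what is proved, stated in full; the proofs are below) =====
def Claim_equal_svg_corrector : Prop := ∀ (recorder : String), Dom_svg_corrector recorder → Spec_svg_corrector recorder (svg_corrector recorder)

-- ===== LEMMAS AND PROOFS =====

-- Reference shape shared by both proofs: the text A's second loop appends after its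
-- accumulator, parameterised by the pending ellipse block `ell` (emptied at the first bond)
-- and the line terminator `nl`.
def svgSplice (b e : List Char → Bool) (nl : List Char) : List Char → List (List Char) → List Char
  | _, [] => []
  | ell, l :: ls =>
    if b l then ell ++ l ++ nl ++ svgSplice b e nl [] ls
    else if e l then svgSplice b e nl ell ls
    else l ++ nl ++ svgSplice b e nl ell ls

theorem svgSplice_loopA (b e : List Char → Bool) (nl : List Char) (L : List (List Char)) :
    ∀ (out ell : List Char),
      (L.foldl
        (fun (st : List Char × List Char) entry =>
          if b entry then (st.1 ++ st.2 ++ entry ++ nl, ([] : List Char))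
          else if e entry then st
          else (st.1 ++ entry ++ nl, st.2))
        (out, ell)).1 = out ++ svgSplice b e nl ell L := by
  induction L with
  | nil => intro out ell; simp [svgSplice]
  | cons l ls ih =>
    intro out ell
    by_cases hb : b l
    · simp only [List.foldl_cons, if_pos hb]
      rw [ih]; simp [svgSplice, hb, List.append_assoc]
    · by_cases he : e l
      · simp only [List.foldl_cons, if_neg hb, if_pos he]
        rw [ih]; simp [svgSplice, hb, he]
      · simp only [List.foldl_cons, if_neg hb, if_neg he]
        rw [ih]; simp [svgSplice, hb, he, List.append_assoc]

theorem svgSplice_empty (b e : List Char → Bool) (nl : List Char) (L : List (List Char)) :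
    svgSplice b e nl [] L
      = ((L.filter (fun l => b l || !e l)).map (· ++ nl)).flatten := by
  induction L with
  | nil => simp [svgSplice]
  | cons l ls ih =>
    by_cases hb : b l
    · simp [svgSplice, hb, ih, List.append_assoc]
    · by_cases he : e l
      · simp [svgSplice, hb, he, ih]
      · simp [svgSplice, hb, he, ih]

theorem svgSplice_body (b e : List Char → Bool) (nl : List Char) (L : List (List Char)) :
    ∀ ell : List Char,
      (match (L.filter (fun l => b l || !e l)).findIdx? b with
        | none => (((L.filter (fun l => b l || !e l)).map (· ++ nl)).flatten)
        | some i =>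
            (((L.filter (fun l => b l || !e l)).take i).map (· ++ nl)).flatten ++ ell
              ++ (((L.filter (fun l => b l || !e l)).drop i).map (· ++ nl)).flatten)
      = svgSplice b e nl ell L := by
  induction L with
  | nil => intro ell; simp [svgSplice]
  | cons l ls ih =>
    intro ell
    by_cases hb : b l
    · rw [List.filter_cons_of_pos (by simp [hb]), List.findIdx?_cons, if_pos hb]
      simp only [List.take_zero, List.drop_zero, List.map_nil, List.flatten_nil, List.nil_append]
      rw [svgSplice, if_pos hb, svgSplice_empty]
      simp [List.append_assoc]
    · by_cases he : e l
      · rw [List.filter_cons_of_neg (by simp [hb, he])]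
        rw [svgSplice, if_neg hb, if_pos he]
        exact ih ell
      · rw [List.filter_cons_of_pos (by simp [hb, he]), List.findIdx?_cons, if_neg hb]
        rw [svgSplice, if_neg hb, if_neg he, ← ih ell]
        cases h : (ls.filter (fun l => b l || !e l)).findIdx? b with
        | none => simp
        | some i => simp [List.append_assoc]

-- ===== VERDICT (by name: the statement is the Claim_ definition above) =====
theorem svg_corrector_spec : Claim_equal_svg_corrector := by
  intro recorder _
  show _ = _
  unfold svg_corrector svg_corrector_alt
  simp only [PySem.List.foldl_append_if]
  rw [svgSplice_loopA, ← svgSplice_body]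
  simp
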